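-- pv_equiv track=rewrite | github.com/navkant/ds_algo_practice | scaler/problem_solving/sum_the_diff.py | solve
-- ===== SOURCE A (Python) =====
-- def solve(A):
--     n = len(A)
--
--     A.sort()
--     total_contribution = 0
--
--     for i in range(n):
--         if i == 0:
--             no_lesser_elements = 0
--         else:
--             no_lesser_elements = i
--
--         if i == n - 1:
--             no_greater_element = 0
--         else:
--             no_greater_element = n - i - 1
--
--         min_contribution = A[i] * (2 ** (no_greater_element))
--         max_contibution = A[i] * (2 ** (no_lesser_elements))
--         contribution = max_contibution - min_contribution
--         total_contribution += contribution
--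
--     return total_contribution
-- ===== SOURCE B (Python) =====
-- def solve(A):
--     # gap-contribution identity: each adjacent sorted gap A[i+1]-A[i] is spanned by
--     # (2**(i+1)-1)*(2**(n-i-1)-1) subsets' [min,max] ranges
--     A.sort()
--     n = len(A)
--     total = 0
--     for i in range(n - 1):
--         total += (A[i + 1] - A[i]) * (2 ** (i + 1) - 1) * (2 ** (n - i - 1) - 1)
--     return total
-- ===== Notes on version B (the rewrite author's own statement) =====
-- stated objective: alternative
-- what changed: Instead of summing per-element max/min contributions A[i]*(2^i - 2^(n-1-i)) with branchy edge cases, B sums over adjacent sorted gaps: (A[i+1]-A[i]) times the count of subsets whose [min,max] range spans that gap, maintaining only a running total.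
import Mathlib
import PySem

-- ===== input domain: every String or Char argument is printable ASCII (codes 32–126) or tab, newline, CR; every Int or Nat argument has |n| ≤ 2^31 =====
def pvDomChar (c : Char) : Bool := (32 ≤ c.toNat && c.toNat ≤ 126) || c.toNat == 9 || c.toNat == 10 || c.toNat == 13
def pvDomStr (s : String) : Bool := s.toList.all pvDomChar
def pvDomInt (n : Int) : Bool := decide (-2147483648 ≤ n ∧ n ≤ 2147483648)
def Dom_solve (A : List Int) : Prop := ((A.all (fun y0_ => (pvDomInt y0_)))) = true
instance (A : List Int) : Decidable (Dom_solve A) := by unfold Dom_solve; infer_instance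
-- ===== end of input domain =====

-- B replaces A's per-element max/min contribution sum by a sum over adjacent sorted
-- gaps weighted by the number of subsets spanning each gap (alternative decomposition).
-- Both Pythons sort A in place; the equivalence proved is about the RETURN value.

-- ===== PORT A =====
def solve (A : List Int) : Int :=
  let n : Int := PySem.List.len A
  let s : List Int := PySem.List.sorted A id      -- A.sort()
  (PySem.List.pyRange 0 n).foldl (fun total i =>
    let no_lesser : Int := if i = 0 then 0 else i
    let no_greater : Int := if i = n - 1 then 0 else n - i - 1
    -- Python's 2 ** e: exact as 2 ^ e.toNat since both exponents are nonnegative here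
    let min_contribution : Int := PySem.List.pyGetD s i 0 * 2 ^ no_greater.toNat
    let max_contibution : Int := PySem.List.pyGetD s i 0 * 2 ^ no_lesser.toNat
    total + (max_contibution - min_contribution)) 0

-- ===== PORT B =====
def solve_alt (A : List Int) : Int :=
  let s : List Int := PySem.List.sorted A id      -- A.sort()
  let n : Int := PySem.List.len s
  (PySem.List.pyRange 0 (n - 1)).foldl (fun total i =>
    -- Python's 2 ** e: exact as 2 ^ e.toNat since both exponents are nonnegative here
    total + (PySem.List.pyGetD s (i + 1) 0 - PySem.List.pyGetD s i 0)
      * (2 ^ (i + 1).toNat - 1) * (2 ^ (n - i - 1).toNat - 1)) 0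

-- ===== PRECONDITION & SPEC =====
def Spec_solve (A : List Int) (out : Int) : Prop := out = solve_alt A
instance (A : List Int) (out : Int) : Decidable (Spec_solve A out) := by unfold Spec_solve; infer_instance

-- ===== CLAIM (what is proved, stated in full; the proofs are below) =====
def Claim_equal_solve : Prop := ∀ (A : List Int), Dom_solve A → Spec_solve A (solve A)

-- ===== LEMMAS AND PROOFS =====

/-- A's total over the suffix of the sorted list starting at position `k`
(`t.length` elements remain after the head, so the min weight is `2 ^ t.length`). -/
def Ssum : List Int → Nat → Int
  | [], _ => 0
  | x :: t, k => x * ((2 : Int) ^ k - 2 ^ t.length) + Ssum t (k + 1)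

/-- B's gap total over the suffix starting at position `k`. -/
def Psum : List Int → Nat → Int
  | [], _ => 0
  | [_], _ => 0
  | x :: y :: t, k =>
      (y - x) * ((2 : Int) ^ (k + 1) - 1) * ((2 : Int) ^ (t.length + 1) - 1)
        + Psum (y :: t) (k + 1)

def corr : List Int → Nat → Int
  | [], _ => 0
  | x :: t, k => -x * ((2 : Int) ^ k - 1) * ((2 : Int) ^ (t.length + 1) - 1)

theorem psum_eq_ssum_corr : ∀ (l : List Int) (k : Nat), Psum l k = Ssum l k + corr l k
  | [], k => by simp [Psum, Ssum, corr]
  | [x], k => by simp [Psum, Ssum, corr]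
  | x :: y :: t, k => by
      have ih := psum_eq_ssum_corr (y :: t) (k + 1)
      simp only [Psum, Ssum, corr] at *
      rw [ih]
      simp only [List.length_cons]
      ring

theorem foldA : ∀ (t s : List Int) (j : Nat) (acc : Int), s.drop j = t →
    (PySem.List.pyRange (j : Int) (s.length : Int)).foldl (fun total i =>
      total + (PySem.List.pyGetD s i 0 * 2 ^ (if i = 0 then (0 : Int) else i).toNat
        - PySem.List.pyGetD s i 0
            * 2 ^ (if i = (s.length : Int) - 1 then (0 : Int)
                    else (s.length : Int) - i - 1).toNat)) acc
      = acc + Ssum t j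
  | [], s, j, acc, h => by
      have hj : s.length ≤ j := by
        have := congrArg List.length h; simp at this; omega
      rw [PySem.List.pyRange_one_eq_nil (by exact_mod_cast hj)]
      simp [Ssum]
  | x :: t, s, j, acc, h => by
      have hj : j < s.length := by
        have := congrArg List.length h; simp at this; omega
      have hlen : t.length = s.length - j - 1 := by
        have := congrArg List.length h; simp at this; omega
      have hget : PySem.List.pyGetD s (j : Int) 0 = x := by
        have e : (List.drop j s)[0]? = s[j + 0]? := List.getElem?_drop
        rw [h] at e
        simp only [Nat.add_zero, List.getElem?_cons_zero] at e
        simp [PySem.List.pyGetD_natCast, List.getD, ← e]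
      have hdrop : s.drop (j + 1) = t := by
        have : s.drop (j + 1) = (s.drop j).drop 1 := by
          rw [List.drop_drop]
        rw [this, h]; rfl
      rw [PySem.List.pyRange_one_cons (by exact_mod_cast hj)]
      rw [List.foldl_cons]
      have step : acc + (PySem.List.pyGetD s (j : Int) 0
            * 2 ^ (if (j : Int) = 0 then (0 : Int) else (j : Int)).toNat
          - PySem.List.pyGetD s (j : Int) 0
            * 2 ^ (if (j : Int) = (s.length : Int) - 1 then (0 : Int)
                    else (s.length : Int) - (j : Int) - 1).toNat)
          = acc + x * ((2 : Int) ^ j - 2 ^ t.length) := by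
        rw [hget]
        split_ifs with h0 hl hl
        · have hj0 : j = 0 := by exact_mod_cast h0
          have htl : t.length = 0 := by omega
          simp [hj0, htl]
        · have hj0 : j = 0 := by exact_mod_cast h0
          have hexp : ((s.length : Int) - (j : Int) - 1).toNat = t.length := by omega
          rw [hexp]
          simp [hj0]
          ring
        · have htl : t.length = 0 := by omega
          have hexp : ((j : Int)).toNat = j := by omega
          rw [hexp]
          simp [htl]
          ring
        · have hexp1 : ((j : Int)).toNat = j := by omega
          have hexp2 : ((s.length : Int) - (j : Int) - 1).toNat = t.length := by omega
          rw [hexp1, hexp2]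
          ring
      rw [step]
      have hcast : ((j : Int) + 1) = ((j + 1 : Nat) : Int) := by push_cast; ring
      rw [hcast, foldA t s (j + 1) _ hdrop]
      simp [Ssum]; ring

theorem foldB : ∀ (t s : List Int) (j : Nat) (acc : Int), s.drop j = t →
    (PySem.List.pyRange (j : Int) ((s.length : Int) - 1)).foldl (fun total i =>
      total + (PySem.List.pyGetD s (i + 1) 0 - PySem.List.pyGetD s i 0)
        * (2 ^ (i + 1).toNat - 1) * (2 ^ ((s.length : Int) - i - 1).toNat - 1)) acc
      = acc + Psum t j
  | [], s, j, acc, h => by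
      have hj : s.length ≤ j := by
        have := congrArg List.length h; simp at this; omega
      rw [PySem.List.pyRange_one_eq_nil (by omega)]
      simp [Psum]
  | [x], s, j, acc, h => by
      have hj : s.length = j + 1 := by
        have := congrArg List.length h; simp at this; omega
      rw [PySem.List.pyRange_one_eq_nil (by omega)]
      simp [Psum]
  | x :: y :: t, s, j, acc, h => by
      have hlen : s.length = j + t.length + 2 := by
        have := congrArg List.length h; simp at this; omega
      have hgx : PySem.List.pyGetD s (j : Int) 0 = x := by
        have e : (List.drop j s)[0]? = s[j + 0]? := List.getElem?_drop
        rw [h] at e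
        simp only [Nat.add_zero, List.getElem?_cons_zero] at e
        simp [PySem.List.pyGetD_natCast, List.getD, ← e]
      have hdrop : s.drop (j + 1) = y :: t := by
        have : s.drop (j + 1) = (s.drop j).drop 1 := by rw [List.drop_drop]
        rw [this, h]; rfl
      have hgy : PySem.List.pyGetD s ((j : Int) + 1) 0 = y := by
        have hcast : ((j : Int) + 1) = ((j + 1 : Nat) : Int) := by push_cast; ring
        have e : (List.drop (j + 1) s)[0]? = s[(j + 1) + 0]? := List.getElem?_drop
        rw [hdrop] at e
        simp only [List.getElem?_cons_zero] at e
        rw [hcast, PySem.List.pyGetD_natCast]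
        simp [List.getD, ← e]
      rw [PySem.List.pyRange_one_cons (by omega)]
      rw [List.foldl_cons]
      have hexp1 : ((j : Int) + 1).toNat = j + 1 := by omega
      have hexp2 : ((s.length : Int) - (j : Int) - 1).toNat = t.length + 1 := by omega
      have step : acc + (PySem.List.pyGetD s ((j : Int) + 1) 0 - PySem.List.pyGetD s (j : Int) 0)
            * (2 ^ ((j : Int) + 1).toNat - 1) * (2 ^ ((s.length : Int) - (j : Int) - 1).toNat - 1)
          = acc + (y - x) * ((2 : Int) ^ (j + 1) - 1) * ((2 : Int) ^ (t.length + 1) - 1) := by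
        rw [hgx, hgy, hexp1, hexp2]
      rw [step]
      have hcast : ((j : Int) + 1) = ((j + 1 : Nat) : Int) := by push_cast; ring
      rw [hcast, foldB (y :: t) s (j + 1) _ hdrop]
      simp [Psum]; ring

theorem solve_eq_ssum (A : List Int) : solve A = Ssum (PySem.List.sorted A id) 0 := by
  have hlen : (PySem.List.sorted A id).length = A.length := PySem.List.length_sorted A id false
  have h := foldA (PySem.List.sorted A id) (PySem.List.sorted A id) 0 0 (by simp)
  simp only [Nat.cast_zero] at h
  simpa [solve, PySem.List.len, hlen] using h

theorem solve_alt_eq_psum (A : List Int) : solve_alt A = Psum (PySem.List.sorted A id) 0 := by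
  have h := foldB (PySem.List.sorted A id) (PySem.List.sorted A id) 0 0 (by simp)
  simp only [Nat.cast_zero] at h
  simpa [solve_alt, PySem.List.len] using h

theorem psum_zero (l : List Int) : Psum l 0 = Ssum l 0 := by
  rw [psum_eq_ssum_corr]
  cases l with
  | nil => simp [corr]
  | cons x t => simp [corr]

-- ===== VERDICT (by name: the statement is the Claim_ definition above) =====
theorem solve_spec : Claim_equal_solve := by
  intro A _
  unfold Spec_solve
  rw [solve_eq_ssum, solve_alt_eq_psum, psum_zero]
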